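-- pv_equiv track=rewrite | github.com/PiotrSCerebellum/AdventCalendar2023 | AdventDay9part2.py | makeBackwardsprediction
-- ===== SOURCE A (Python) =====
-- from collections import deque
--
-- def makeBackwardsprediction(allLevels):
--     predicted=deque()
--     lastPrediction=0
--     for level in reversed(allLevels):
--         level = deque(level)
--         lastPrediction=level[0]-lastPrediction
--         level.appendleft(lastPrediction)
--         level = list(level)
--         predicted.appendleft(level)
--     return list(predicted)
-- ===== SOURCE B (Python) =====
-- def makeBackwardsprediction(allLevels):
--     # closed form: the value prepended to row i is the alternating suffix sum of the
--     # first column, computed as sign_i * (total - prefix_i) from forward prefix sums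
--     prefix = [0]
--     last = 0
--     sign = 1
--     for level in allLevels:
--         last = last + sign * level[0]
--         prefix.append(last)
--         sign = -sign
--     total = last
--     out = []
--     sign = 1
--     for p, level in zip(prefix, allLevels):
--         out.append([sign * (total - p)] + list(level))
--         sign = -sign
--     return out
-- ===== Notes on version B (the rewrite author's own statement) =====
-- stated objective: alternative
-- what changed: Replaces A's backward pass with the recurrence acc = level[0] - acc by a forward prefix-alternating-sum pass over the first column and the closed formula sign_i * (total - prefix_i) for each prepended value, assembled with zip.
import Mathlib
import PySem

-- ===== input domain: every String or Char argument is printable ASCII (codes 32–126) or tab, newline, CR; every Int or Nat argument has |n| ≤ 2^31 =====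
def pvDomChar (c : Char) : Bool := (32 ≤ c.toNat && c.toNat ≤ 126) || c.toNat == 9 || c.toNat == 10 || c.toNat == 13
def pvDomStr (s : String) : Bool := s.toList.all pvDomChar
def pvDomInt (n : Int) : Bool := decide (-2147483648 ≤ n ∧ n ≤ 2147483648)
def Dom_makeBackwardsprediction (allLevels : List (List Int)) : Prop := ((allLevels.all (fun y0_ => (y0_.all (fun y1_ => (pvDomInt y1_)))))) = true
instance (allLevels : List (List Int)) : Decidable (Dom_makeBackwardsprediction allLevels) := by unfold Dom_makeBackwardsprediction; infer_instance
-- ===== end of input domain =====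

-- B computes each prepended value in closed form, sign_i * (total - prefix_i) from forward
-- alternating prefix sums of the first column, instead of A's backward acc = first - acc pass;
-- objective: alternative. Equivalence proved on Pre_ (no empty level).
-- ===== PORT A =====
-- one reverse pass: state = (rows built so far, lastPrediction); level[0] ported as headD 0,
-- exact on Pre_ (Python raises IndexError on an empty level, excluded by Pre_)
def makeBackwardsprediction (allLevels : List (List Int)) : List (List Int) :=
  (allLevels.reverse.foldl
    (fun (st : List (List Int) × Int) level =>
      let lastPrediction := level.headD 0 - st.2
      ((lastPrediction :: level) :: st.1, lastPrediction))
    ([], 0)).1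
-- ===== PORT B =====
-- pass 1: forward fold building (prefix list, last, sign), level[0] ported as headD 0 (exact on
-- Pre_); pass 2: fold over zip(prefix, allLevels) assembling rows by sign * (total - p)
def makeBackwardsprediction_alt (allLevels : List (List Int)) : List (List Int) :=
  let st := allLevels.foldl
    (fun (st : List Int × Int × Int) level =>
      let last := st.2.1 + st.2.2 * level.headD 0
      (st.1 ++ [last], last, -st.2.2)) ([0], 0, 1)
  let total := st.2.1
  ((st.1.zip allLevels).foldl
    (fun (o : List (List Int) × Int) pl =>
      (o.1 ++ [(o.2 * (total - pl.1)) :: pl.2], -o.2)) ([], 1)).1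
-- ===== PRECONDITION & SPEC =====
-- Pre_ excludes inputs containing an empty level: there Python A (level[0]) raises IndexError.
def Pre_makeBackwardsprediction (allLevels : List (List Int)) : Prop :=
  ∀ level ∈ allLevels, level ≠ []
instance (allLevels : List (List Int)) : Decidable (Pre_makeBackwardsprediction allLevels) := by unfold Pre_makeBackwardsprediction; infer_instance
def pvWitness_makeBackwardsprediction : List (List Int) := [[5, 1], [2], [7, 7, 7]]
def Spec_makeBackwardsprediction (allLevels : List (List Int)) (out : List (List Int)) : Prop := out = makeBackwardsprediction_alt allLevels
instance (allLevels : List (List Int)) (out : List (List Int)) : Decidable (Spec_makeBackwardsprediction allLevels out) := by unfold Spec_makeBackwardsprediction; infer_instance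
-- ===== CLAIM (what is proved, stated in full; the proofs are below) =====
def Claim_equal_makeBackwardsprediction : Prop := ∀ (allLevels : List (List Int)), Dom_makeBackwardsprediction allLevels → Pre_makeBackwardsprediction allLevels → Spec_makeBackwardsprediction allLevels (makeBackwardsprediction allLevels)
-- ===== LEMMAS AND PROOFS =====
-- recursive characterisation of A's result: rows with the prepended value, plus that value
def specGo : List (List Int) → (List (List Int) × Int)
  | [] => ([], 0)
  | l :: ls =>
    let p := specGo ls
    let v := l.headD 0 - p.2
    ((v :: l) :: p.1, v)
lemma aFold_eq (ls : List (List Int)) :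
    ls.reverse.foldl
      (fun (st : List (List Int) × Int) level =>
        let lastPrediction := level.headD 0 - st.2
        ((lastPrediction :: level) :: st.1, lastPrediction))
      ([], 0) = specGo ls := by
  induction ls with
  | nil => rfl
  | cons l ls ih =>
    rw [List.reverse_cons, List.foldl_append, ih]
    rfl
-- the alternating prefix entries appended by B's first loop
def pref : Int → Int → List (List Int) → List Int
  | _, _, [] => []
  | last, sign, l :: ls =>
    (last + sign * l.headD 0) :: pref (last + sign * l.headD 0) (-sign) ls
-- the final value of `last` after B's first loop (the alternating sum)
def altA : Int → Int → List (List Int) → Int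
  | last, _, [] => last
  | last, sign, l :: ls => altA (last + sign * l.headD 0) (-sign) ls
lemma bFold1 : ∀ (ls : List (List Int)) (acc : List Int) (last sign : Int),
    (ls.foldl
      (fun (st : List Int × Int × Int) level =>
        let last := st.2.1 + st.2.2 * level.headD 0
        (st.1 ++ [last], last, -st.2.2)) (acc, last, sign)).1 = acc ++ pref last sign ls
  ∧ (ls.foldl
      (fun (st : List Int × Int × Int) level =>
        let last := st.2.1 + st.2.2 * level.headD 0
        (st.1 ++ [last], last, -st.2.2)) (acc, last, sign)).2.1 = altA last sign ls := by
  intro ls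
  induction ls with
  | nil => intro acc last sign; simp [pref, altA]
  | cons l ls ih =>
    intro acc last sign
    simpa [pref, altA, List.append_assoc] using
      ih (acc ++ [last + sign * l.headD 0]) (last + sign * l.headD 0) (-sign)
-- B's second loop, recursively
def loop2 : List (Int × List Int) → Int → Int → List (List Int)
  | [], _, _ => []
  | (p, l) :: rest, t, s => (s * (t - p) :: l) :: loop2 rest t (-s)
lemma loop2_fold (t : Int) : ∀ (pairs : List (Int × List Int)) (acc : List (List Int)) (s : Int),
    (pairs.foldl
      (fun (o : List (List Int) × Int) pl =>
        (o.1 ++ [(o.2 * (t - pl.1)) :: pl.2], -o.2)) (acc, s)).1 = acc ++ loop2 pairs t s := by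
  intro pairs
  induction pairs with
  | nil => intro acc s; simp [loop2]
  | cons pl rest ih =>
    intro acc s
    obtain ⟨p, l⟩ := pl
    simpa [loop2, List.append_assoc] using ih (acc ++ [s * (t - p) :: l]) (-s)
lemma altA_key : ∀ (ls : List (List Int)) (last sign : Int), (sign = 1 ∨ sign = -1) →
    sign * (altA last sign ls - last) = (specGo ls).2 := by
  intro ls
  induction ls with
  | nil => intro last sign _; simp [altA, specGo]
  | cons l ls ih =>
    intro last sign hs
    have h := ih (last + sign * l.headD 0) (-sign) (by rcases hs with h | h <;> simp [h])
    have hs2 : sign * sign = 1 := by rcases hs with h | h <;> simp [h]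
    simp only [altA, specGo, ← h]
    ring_nf
    rcases hs with h | h <;> subst h <;> ring
lemma loop2_spec : ∀ (ls : List (List Int)) (last sign : Int), (sign = 1 ∨ sign = -1) →
    loop2 ((last :: pref last sign ls).zip ls) (altA last sign ls) sign = (specGo ls).1 := by
  intro ls
  induction ls with
  | nil => intro last sign _; simp [loop2, specGo]
  | cons l ls ih =>
    intro last sign hs
    have hrec := ih (last + sign * l.headD 0) (-sign) (by rcases hs with h | h <;> simp [h])
    have hkey := altA_key (l :: ls) last sign hs
    simp only [pref, altA, List.zip_cons_cons, loop2] at *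
    rw [hkey, hrec]
    simp [specGo]
-- ===== VERDICT (by name: the statement is the Claim_ definition above) =====
theorem makeBackwardsprediction_spec : Claim_equal_makeBackwardsprediction := by
  intro allLevels _ _
  unfold Spec_makeBackwardsprediction makeBackwardsprediction makeBackwardsprediction_alt
  have h1 := bFold1 allLevels [0] 0 1
  simp only [aFold_eq, h1.1, h1.2, loop2_fold, List.nil_append, List.cons_append]
  exact (loop2_spec allLevels 0 1 (Or.inl rfl)).symm
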